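-- pv_equiv track=rewrite | github.com/alvi-codes/Coding-Time | Python/Sparse Matrix.py | solution_is_correct
-- ===== SOURCE A (Python) =====
-- correct_solution = [
--     [1, 2],
--     [3, 1, 2],
--     [0, 2, 1],
--     [1, 2]
-- ]
--
-- def solution_is_correct(row):
--     if len(row)!=4:
--         return False
--     for i in range(4):
--         if len(row[i])!=len(correct_solution[i]):
--             return False
--         x = sorted(row[i])
--         y = sorted(correct_solution[i])
--         if any(x[j]!=y[j] for j in range(len(x))):
--             return False
--     return True
-- ===== SOURCE B (Python) =====
-- from collections import Counter
--
-- _CORRECT_COUNTERS = [Counter(r) for r in [[1, 2], [3, 1, 2], [0, 2, 1], [1, 2]]]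
--
-- def solution_is_correct(row):
--     return len(row) == 4 and all(
--         Counter(r) == c for r, c in zip(row, _CORRECT_COUNTERS)
--     )
-- ===== Notes on version B (the rewrite author's own statement) =====
-- stated objective: idiomatic
-- what changed: Replaces the per-row sort-then-index-compare (with a separate length guard) by comparing collections.Counter multisets against counters of the fixed correct solution precomputed once at module level, iterating with zip instead of indices.
import Mathlib
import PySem

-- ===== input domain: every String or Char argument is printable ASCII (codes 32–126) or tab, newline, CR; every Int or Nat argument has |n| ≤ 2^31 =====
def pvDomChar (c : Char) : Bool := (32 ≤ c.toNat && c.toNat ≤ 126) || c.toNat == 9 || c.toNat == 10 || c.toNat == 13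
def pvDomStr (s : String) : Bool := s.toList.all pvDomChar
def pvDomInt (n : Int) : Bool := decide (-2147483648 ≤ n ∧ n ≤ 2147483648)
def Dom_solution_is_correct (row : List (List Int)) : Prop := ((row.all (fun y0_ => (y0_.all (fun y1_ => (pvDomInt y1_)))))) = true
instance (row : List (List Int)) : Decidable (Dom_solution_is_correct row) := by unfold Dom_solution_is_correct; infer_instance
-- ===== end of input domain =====

-- B replaces the per-row sort-and-index-compare with a Counter (multiset) comparison against
-- precomputed counters of the fixed correct solution; objective: idiomatic (not measurably faster).

-- ===== PORT A =====
-- the module constant correct_solution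
def pvCorrect : List (List Int) := [[1, 2], [3, 1, 2], [0, 2, 1], [1, 2]]

-- body of one iteration of A's for-loop (the two early `return False` tests)
def pvRowOkA (ri yi : List Int) : Bool :=
  if ri.length ≠ yi.length then false
  else  -- x := sorted(row[i]), y := sorted(correct_solution[i]) inlined
    if (List.range (PySem.List.sorted ri (fun v => v) false).length).any (fun j =>
        !(PySem.List.pyGet? (PySem.List.sorted ri (fun v => v) false) (j : Int) ==
          PySem.List.pyGet? (PySem.List.sorted yi (fun v => v) false) (j : Int))) then false
    else true

-- `for i in range(4)` as recursion over the index list [0,1,2,3]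
def pvALoop (row : List (List Int)) : List Nat → Bool
  | [] => true
  | i :: rest =>
    match PySem.List.pyGet? row (i : Int), PySem.List.pyGet? pvCorrect (i : Int) with
    | some ri, some yi => if pvRowOkA ri yi then pvALoop row rest else false
    | _, _ => false   -- unreachable: len(row) == 4 was checked and i < 4

def solution_is_correct (row : List (List Int)) : Bool :=
  if row.length ≠ 4 then false
  else pvALoop row (List.range 4)

-- ===== PORT B =====
-- Python Counter == is dict equality; counter values are positive, so comparing getD _ 0
-- over both key lists is exact for counters.
def pvCounterEq (c1 c2 : PySem.Dict Int Int) : Bool :=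
  c1.keys.all (fun k => c2.getD k 0 == c1.getD k 0) &&
  c2.keys.all (fun k => c1.getD k 0 == c2.getD k 0)

-- _CORRECT_COUNTERS, precomputed at module level
def pvCS : List (PySem.Dict Int Int) :=
  ([[1, 2], [3, 1, 2], [0, 2, 1], [1, 2]] : List (List Int)).map PySem.Dict.counter

def solution_is_correct_alt (row : List (List Int)) : Bool :=
  (row.length == 4) &&
    (row.zip pvCS).all (fun p => pvCounterEq (PySem.Dict.counter p.1) p.2)

-- ===== PRECONDITION & SPEC =====
def Spec_solution_is_correct (row : List (List Int)) (out : Bool) : Prop := out = solution_is_correct_alt row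
instance (row : List (List Int)) (out : Bool) : Decidable (Spec_solution_is_correct row out) := by unfold Spec_solution_is_correct; infer_instance

-- ===== CLAIM (what is proved, stated in full; the proofs are below) =====
def Claim_equal_solution_is_correct : Prop := ∀ (row : List (List Int)), Dom_solution_is_correct row → Spec_solution_is_correct row (solution_is_correct row)

-- ===== LEMMAS AND PROOFS =====

-- A's per-row check passes iff the row is a permutation of the reference row
lemma rowOkA_iff_perm (r y : List Int) : pvRowOkA r y = true ↔ r.Perm y := by
  unfold pvRowOkA
  split_ifs with hlen hany
  · simp only [Bool.false_eq_true, false_iff]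
    intro hp; exact hlen hp.length_eq
  · simp only [Bool.false_eq_true, false_iff]
    intro hp
    simp only [List.any_eq_true, List.mem_range, Bool.not_eq_eq_eq_not, Bool.not_true,
      beq_eq_false_iff_ne, ne_eq] at hany
    obtain ⟨j, hj, hne⟩ := hany
    have hs : PySem.List.sorted r (fun v => v) false = PySem.List.sorted y (fun v => v) false := by
      rw [PySem.List.sorted_id_eq_sorted_id_iff_perm]; exact hp
    exact hne (by rw [hs])
  · simp only [true_iff]
    simp only [Bool.not_eq_true, List.any_eq_false, List.mem_range, Bool.not_eq_eq_eq_not, Bool.not_true,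
      Bool.not_eq_false, beq_iff_eq] at hany
    rw [← PySem.List.sorted_id_eq_sorted_id_iff_perm]
    apply List.ext_getElem?
    intro j
    by_cases hj : j < (PySem.List.sorted r (fun v => v) false).length
    · have := hany j hj
      rwa [PySem.List.pyGet?_natCast, PySem.List.pyGet?_natCast] at this
    · rw [List.getElem?_eq_none (by omega), List.getElem?_eq_none]
      simp only [PySem.List.length_sorted] at hj ⊢
      omega

-- B's per-row check passes iff the row is a permutation of the reference row
lemma counterEq_iff_perm (r y : List Int) :
    pvCounterEq (PySem.Dict.counter r) (PySem.Dict.counter y) = true ↔ r.Perm y := by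
  unfold pvCounterEq
  rw [List.perm_iff_count]
  simp only [Bool.and_eq_true, List.all_eq_true, PySem.Dict.keys_counter,
    PySem.Set.mem_ofList, PySem.Dict.getD_counter, beq_iff_eq]
  constructor
  · rintro ⟨h1, h2⟩ v
    by_cases hr : v ∈ r
    · have := h1 v hr; omega
    · by_cases hy : v ∈ y
      · have := h2 v hy; omega
      · rw [List.count_eq_zero_of_not_mem hr, List.count_eq_zero_of_not_mem hy]
  · intro h
    constructor <;> intro v _ <;> have := h v <;> omega

lemma rowOkA_eq_counterEq (r y : List Int) :
    pvRowOkA r y = pvCounterEq (PySem.Dict.counter r) (PySem.Dict.counter y) := by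
  rw [Bool.eq_iff_iff, rowOkA_iff_perm, counterEq_iff_perm]

-- ===== VERDICT (by name: the statement is the Claim_ definition above) =====
theorem solution_is_correct_spec : Claim_equal_solution_is_correct := by
  intro row _
  unfold Spec_solution_is_correct solution_is_correct solution_is_correct_alt
  by_cases hl : row.length = 4
  · match row, hl with
    | [a, b, c, d], _ =>
      have hr4 : List.range 4 = [0, 1, 2, 3] := by decide
      rw [if_neg (by simp), hr4]
      have h0 := rowOkA_eq_counterEq a [1, 2]
      have h1 := rowOkA_eq_counterEq b [3, 1, 2]
      have h2 := rowOkA_eq_counterEq c [0, 2, 1]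
      have h3 := rowOkA_eq_counterEq d [1, 2]
      simp [pvALoop, pvCorrect, pvCS, h0, h1, h2, h3]
  · simp [hl]
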